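-- pv_equiv track=rewrite | github.com/erwan35/RaySession | src/gui/patchcanvas/utils.py | get_portgroup_name_from_ports_names
-- ===== SOURCE A (Python) =====
-- def get_portgroup_name_from_ports_names(ports_names: list[str]):
--     if len(ports_names) < 2:
--         return ''
--
--     portgrp_name_ends = (' ', '_', '.', '-', '#', ':', 'out', 'in', 'Out',
--                          'In', 'Output', 'Input', 'output', 'input')
--
--     # set portgrp name
--     portgrp_name = ''
--
--     for c in ports_names[0]:
--         for eachname in ports_names:
--             if not eachname.startswith(portgrp_name + c):
--                 break
--         else:
--             portgrp_name += c
--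
--     # reduce portgrp name until it ends with one of the characters
--     # in portgrp_name_ends
--     if not portgrp_name.endswith((' AUX', '_AUX')):
--         check = False
--         while not check:
--             for x in portgrp_name_ends:
--                 if portgrp_name.endswith(x):
--                     check = True
--                     break
--
--             if len(portgrp_name) == 0 or portgrp_name in ports_names:
--                 check = True
--
--             if not check:
--                 portgrp_name = portgrp_name[:-1]
--
--     return portgrp_name
-- ===== SOURCE B (Python) =====
-- def get_portgroup_name_from_ports_names(ports_names: list[str]):
--     if len(ports_names) < 2:
--         return ''
--
--     # common prefix, column-wise over the transposed names
--     k = 0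
--     for column in zip(*ports_names):
--         if len(set(column)) != 1:
--             break
--         k += 1
--     name = ports_names[0][:k]
--
--     if name.endswith((' AUX', '_AUX')):
--         return name
--
--     ends = (' ', '_', '.', '-', '#', ':', 'out', 'in', 'Out', 'In',
--             'Output', 'Input', 'output', 'input')
--     # pick the longest prefix of name that ends acceptably or is a port name
--     for i in reversed(range(1, len(name) + 1)):
--         p = name[:i]
--         if p.endswith(ends) or p in ports_names:
--             return p
--     return ''
-- ===== Notes on version B (the rewrite author's own statement) =====
-- stated objective: alternative
-- what changed: The common prefix is computed column-wise over the transposed names (zip(*ports_names), counting uniform columns) instead of growing a prefix character by character with a startswith re-scan per name, and the suffix-trimming while loop is replaced by a single search over prefixes of the name from longest to shortest returning the first acceptable one.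
import Mathlib
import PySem

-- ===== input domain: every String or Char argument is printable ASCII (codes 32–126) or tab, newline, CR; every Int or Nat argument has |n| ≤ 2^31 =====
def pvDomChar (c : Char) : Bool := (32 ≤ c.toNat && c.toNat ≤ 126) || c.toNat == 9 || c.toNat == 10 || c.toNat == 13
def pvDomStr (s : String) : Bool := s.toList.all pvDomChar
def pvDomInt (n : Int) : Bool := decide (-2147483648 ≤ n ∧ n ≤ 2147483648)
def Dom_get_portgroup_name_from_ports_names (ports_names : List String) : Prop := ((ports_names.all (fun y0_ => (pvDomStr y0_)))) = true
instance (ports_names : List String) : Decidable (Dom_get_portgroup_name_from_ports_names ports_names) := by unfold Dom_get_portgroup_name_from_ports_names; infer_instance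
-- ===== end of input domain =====

-- B computes the common prefix column-wise over the transposed names (count uniform
-- columns) and replaces the trimming while-loop by a longest-first search over the
-- prefixes of that name (objective: alternative algorithm, same cost class).

-- ===== PORT A =====
def pvEndsA : List (List Char) :=
  [[' '], ['_'], ['.'], ['-'], ['#'], [':'],
   ['o','u','t'], ['i','n'], ['O','u','t'], ['I','n'],
   ['O','u','t','p','u','t'], ['I','n','p','u','t'],
   ['o','u','t','p','u','t'], ['i','n','p','u','t']]

-- inner 'for eachname … break / else: portgrp_name += c'
def pvStepA (lists : List (List Char)) (acc : List Char) (c : Char) : List Char :=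
  if lists.all (fun n => PySem.Chars.startswith n (acc ++ [c])) then acc ++ [c] else acc

-- the 'while not check' trimming loop of A
def pvTrimA (ports : List (List Char)) (pg : List Char) : List Char :=
  if pvEndsA.any (fun x => PySem.Chars.endswith pg x) || pg.length == 0 || ports.contains pg
  then pg
  else pvTrimA ports pg.dropLast
termination_by pg.length
decreasing_by
  rename_i h
  have hne : pg.length ≠ 0 := by
    intro h0
    exact h (by simp [h0])
  simp only [List.length_dropLast]
  omega

def get_portgroup_name_from_ports_names (ports_names : List String) : String :=
  if ports_names.length < 2 then "" else
    let lists := ports_names.map String.toList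
    let pg := (lists.headD []).foldl (pvStepA lists) []
    if PySem.Chars.endswith pg [' ','A','U','X'] || PySem.Chars.endswith pg ['_','A','U','X'] then
      String.ofList pg
    else
      String.ofList (pvTrimA lists pg)

-- ===== PORT B =====
def pvEndsB : List String :=
  [" ", "_", ".", "-", "#", ":", "out", "in", "Out", "In",
   "Output", "Input", "output", "input"]

-- one column of zip(*ports_names) exists and is uniform:
-- every name is long enough and its i-th char equals the first name's i-th char
def pvColOK (lists : List (List Char)) (i : Nat) : Bool :=
  lists.all (fun l => decide (i < l.length)) &&
  lists.all (fun l => l[i]? == (lists.headD [])[i]?)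

-- 'k = 0; for column in zip(*names): if len(set(column)) != 1: break; k += 1'
-- (fuel = length of the first name bounds the number of columns)
def pvK (lists : List (List Char)) : Nat → Nat → Nat
  | i, 0 => i
  | i, fuel+1 => if pvColOK lists i then pvK lists (i+1) fuel else i

-- 'for i in reversed(range(1, len(name)+1)): p = name[:i]; if … : return p' / 'return ""'
def pvPick (ports : List (List Char)) (name : List Char) : List Nat → List Char
  | [] => []
  | i :: is =>
    let p := name.take i
    if (pvEndsB.map String.toList).any (fun x => PySem.Chars.endswith p x) || ports.contains p
    then p
    else pvPick ports name is

def get_portgroup_name_from_ports_names_alt (ports_names : List String) : String :=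
  if ports_names.length < 2 then "" else
    let lists := ports_names.map String.toList
    let nm := (lists.headD []).take (pvK lists 0 (lists.headD []).length)
    if PySem.Chars.endswith nm (" AUX".toList) || PySem.Chars.endswith nm ("_AUX".toList) then
      String.ofList nm
    else
      String.ofList (pvPick lists nm ((List.range' 1 nm.length).reverse))

-- ===== PRECONDITION & SPEC =====
def Spec_get_portgroup_name_from_ports_names (ports_names : List String) (out : String) : Prop := out = get_portgroup_name_from_ports_names_alt ports_names
instance (ports_names : List String) (out : String) : Decidable (Spec_get_portgroup_name_from_ports_names ports_names out) := by unfold Spec_get_portgroup_name_from_ports_names; infer_instance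

-- ===== CLAIM (what is proved, stated in full; the proofs are below) =====
def Claim_equal_get_portgroup_name_from_ports_names : Prop := ∀ (ports_names : List String), Dom_get_portgroup_name_from_ports_names ports_names → Spec_get_portgroup_name_from_ports_names ports_names (get_portgroup_name_from_ports_names ports_names)

-- ===== LEMMAS AND PROOFS =====

-- proof-side longest common prefix of two character lists
def pvLcp2 : List Char → List Char → List Char
  | a :: as, b :: bs => if a = b then a :: pvLcp2 as bs else []
  | _, _ => []

theorem pvLcp2_prefix_left (a : List Char) : ∀ b, pvLcp2 a b <+: a := by
  induction a with
  | nil => intro b; cases b <;> simp [pvLcp2]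
  | cons x xs ih =>
    intro b
    cases b with
    | nil => simp [pvLcp2]
    | cons y ys =>
      by_cases h : x = y
      · subst h
        have hred : pvLcp2 (x :: xs) (x :: ys) = x :: pvLcp2 xs ys := by simp [pvLcp2]
        rw [hred, List.cons_prefix_cons]
        exact ⟨rfl, ih ys⟩
      · simp [pvLcp2, h]

theorem pvLcp2_prefix_right (a : List Char) : ∀ b, pvLcp2 a b <+: b := by
  induction a with
  | nil => intro b; cases b <;> simp [pvLcp2]
  | cons x xs ih =>
    intro b
    cases b with
    | nil => simp [pvLcp2]
    | cons y ys =>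
      by_cases h : x = y
      · subst h
        have hred : pvLcp2 (x :: xs) (x :: ys) = x :: pvLcp2 xs ys := by simp [pvLcp2]
        rw [hred, List.cons_prefix_cons]
        exact ⟨rfl, ih ys⟩
      · simp [pvLcp2, h]

theorem pvPrefix_lcp2 (p : List Char) : ∀ a b, p <+: a → p <+: b → p <+: pvLcp2 a b := by
  induction p with
  | nil => intro a b _ _; exact List.nil_prefix
  | cons x xs ih =>
    intro a b ha hb
    cases a with
    | nil => exact absurd ha (by simp)
    | cons a' as =>
      cases b with
      | nil => exact absurd hb (by simp)
      | cons b' bs =>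
        rw [List.cons_prefix_cons] at ha hb
        obtain ⟨rfl, ha⟩ := ha
        obtain ⟨rfl, hb⟩ := hb
        have hred : pvLcp2 (x :: as) (x :: bs) = x :: pvLcp2 as bs := by simp [pvLcp2]
        rw [hred, List.cons_prefix_cons]
        exact ⟨rfl, ih as bs ha hb⟩

theorem pvFold_prefix (rest : List (List Char)) :
    ∀ f : List Char, (rest.foldl pvLcp2 f <+: f) ∧ ∀ b ∈ rest, rest.foldl pvLcp2 f <+: b := by
  induction rest with
  | nil => intro f; simp
  | cons b bs ih =>
    intro f
    simp only [List.foldl_cons]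
    obtain ⟨h1, h2⟩ := ih (pvLcp2 f b)
    refine ⟨h1.trans (pvLcp2_prefix_left f b), ?_⟩
    intro x hx
    rcases List.mem_cons.mp hx with rfl | hx
    · exact h1.trans (pvLcp2_prefix_right f x)
    · exact h2 x hx

theorem pvPrefix_fold (rest : List (List Char)) :
    ∀ (f q : List Char), q <+: f → (∀ b ∈ rest, q <+: b) → q <+: rest.foldl pvLcp2 f := by
  induction rest with
  | nil => intro f q hf _; simpa using hf
  | cons b bs ih =>
    intro f q hf hb
    simp only [List.foldl_cons]
    exact ih _ q (pvPrefix_lcp2 q f b hf (hb b (by simp))) (fun x hx => hb x (by simp [hx]))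

theorem pvFoldl_const {g : List Char → Char → List Char} (acc : List Char)
    (h : ∀ c, g acc c = acc) : ∀ l : List Char, l.foldl g acc = acc := by
  intro l
  induction l with
  | nil => rfl
  | cons c cs ih => rw [List.foldl_cons, h c]; exact ih

theorem pvStepA_stuck (lists : List (List Char)) (f acc : List Char) (c : Char) (cs : List Char)
    (hf : f ∈ lists) (hsplit : acc ++ c :: cs = f)
    (hfail : ¬ (lists.all (fun n => PySem.Chars.startswith n (acc ++ [c])) = true)) :
    ∀ c', pvStepA lists acc c' = acc := by
  intro c'
  unfold pvStepA
  split
  · rename_i htest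
    exfalso
    have hpre : acc ++ [c'] <+: f :=
      (PySem.Chars.startswith_iff f (acc ++ [c'])).mp (List.all_eq_true.mp htest f hf)
    rw [← hsplit] at hpre
    have : [c'] <+: c :: cs := (List.prefix_append_right_inj acc).mp hpre
    rw [List.cons_prefix_cons] at this
    obtain ⟨rfl, -⟩ := this
    exact hfail htest
  · rfl

theorem pvFoldA (f : List Char) (tail : List (List Char)) :
    ∀ (cs acc : List Char), acc ++ cs = f → (∀ l ∈ f :: tail, acc <+: l) →
      cs.foldl (pvStepA (f :: tail)) acc = tail.foldl pvLcp2 f := by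
  intro cs
  induction cs with
  | nil =>
    intro acc hsplit hgood
    simp only [List.append_nil] at hsplit
    subst hsplit
    simp only [List.foldl_nil]
    exact (pvPrefix_fold tail acc acc List.prefix_rfl
      (fun b hb => hgood b (by simp [hb]))).eq_of_length_le (pvFold_prefix tail acc).1.length_le
  | cons c cs ih =>
    intro acc hsplit hgood
    rw [List.foldl_cons]
    by_cases htest : (f :: tail).all (fun n => PySem.Chars.startswith n (acc ++ [c])) = true
    · have hstep : pvStepA (f :: tail) acc c = acc ++ [c] := by
        unfold pvStepA; rw [if_pos htest]
      rw [hstep]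
      refine ih (acc ++ [c]) (by simpa using hsplit) ?_
      intro l hl
      exact (PySem.Chars.startswith_iff l (acc ++ [c])).mp (List.all_eq_true.mp htest l hl)
    · have hstep : pvStepA (f :: tail) acc c = acc := by
        unfold pvStepA; rw [if_neg htest]
      rw [hstep, pvFoldl_const acc (pvStepA_stuck (f :: tail) f acc c cs (by simp) hsplit htest) cs]
      -- acc is in fact the maximal common prefix here
      have haccM : acc <+: tail.foldl pvLcp2 f :=
        pvPrefix_fold tail f acc (hgood f (by simp)) (fun b hb => hgood b (by simp [hb]))
      by_contra hne
      have hlt : acc.length < (tail.foldl pvLcp2 f).length := by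
        rcases lt_or_eq_of_le haccM.length_le with hlt | heq
        · exact hlt
        · exact absurd (haccM.eq_of_length_le (le_of_eq heq.symm)) hne
      obtain ⟨M', hM'⟩ := haccM
      have hMf : tail.foldl pvLcp2 f <+: f := (pvFold_prefix tail f).1
      rw [← hM', ← hsplit] at hMf
      have hM'pre : M' <+: c :: cs := (List.prefix_append_right_inj acc).mp hMf
      cases M' with
      | nil => simp [← hM'] at hlt
      | cons m ms =>
        rw [List.cons_prefix_cons] at hM'pre
        obtain ⟨rfl, -⟩ := hM'pre
        apply htest
        rw [List.all_eq_true]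
        intro l hl
        rw [PySem.Chars.startswith_iff]
        have hcM : acc ++ [m] <+: tail.foldl pvLcp2 f := ⟨ms, by rw [← hM']; simp⟩
        rcases List.mem_cons.mp hl with rfl | hl
        · exact hcM.trans (pvFold_prefix tail l).1
        · exact hcM.trans ((pvFold_prefix tail f).2 l hl)

-- ---- B side: the column count equals the length of the common prefix ----

theorem pvPrefix_getElem? (p l : List Char) (h : p <+: l) (i : Nat) (hi : i < p.length) :
    l[i]? = p[i]? := by
  obtain ⟨t, rfl⟩ := h
  rw [List.getElem?_append_left hi]

theorem pvPrefix_snoc (p l : List Char) (c : Char) (h : p <+: l)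
    (hc : l[p.length]? = some c) : p ++ [c] <+: l := by
  obtain ⟨t, rfl⟩ := h
  rw [List.getElem?_append_right (le_refl _), Nat.sub_self] at hc
  cases t with
  | nil => simp at hc
  | cons d ds =>
    simp only [List.getElem?_cons_zero, Option.some.injEq] at hc
    subst hc
    exact ⟨ds, by simp⟩

theorem pvColOK_iff (f : List Char) (tail : List (List Char)) (i : Nat)
    (hi : i ≤ (tail.foldl pvLcp2 f).length) :
    pvColOK (f :: tail) i = true ↔ i < (tail.foldl pvLcp2 f).length := by
  set M := tail.foldl pvLcp2 f with hM
  have hMall : ∀ l ∈ f :: tail, M <+: l := by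
    intro l hl
    rcases List.mem_cons.mp hl with rfl | hl
    · exact (pvFold_prefix tail l).1
    · exact (pvFold_prefix tail f).2 l hl
  constructor
  · intro hok
    by_contra hlt
    have hieq : i = M.length := by omega
    subst hieq
    simp only [pvColOK, Bool.and_eq_true, List.all_eq_true] at hok
    obtain ⟨hlen, hagree⟩ := hok
    have hfM : M <+: f := hMall f (by simp)
    have hflen : M.length < f.length := by
      simpa using of_decide_eq_true (hlen f (by simp))
    obtain ⟨c, hc⟩ : ∃ c, f[M.length]? = some c :=
      ⟨f[M.length], List.getElem?_eq_getElem hflen⟩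
    have hsnoc : ∀ l ∈ f :: tail, M ++ [c] <+: l := by
      intro l hl
      apply pvPrefix_snoc M l c (hMall l hl)
      have := hagree l hl
      simp only [List.headD_cons, beq_iff_eq] at this
      rw [this, hc]
    have : M ++ [c] <+: M :=
      pvPrefix_fold tail f (M ++ [c]) (hsnoc f (by simp)) (fun b hb => hsnoc b (by simp [hb]))
    have := this.length_le
    simp at this
  · intro hlt
    simp only [pvColOK, Bool.and_eq_true, List.all_eq_true]
    constructor
    · intro l hl
      have := (hMall l hl).length_le
      exact decide_eq_true (by omega)
    · intro l hl
      simp only [List.headD_cons, beq_iff_eq]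
      rw [pvPrefix_getElem? M l (hMall l hl) i hlt,
          pvPrefix_getElem? M f (hMall f (by simp)) i hlt]

theorem pvK_eq (f : List Char) (tail : List (List Char)) :
    ∀ (fuel i : Nat), i ≤ (tail.foldl pvLcp2 f).length →
      (tail.foldl pvLcp2 f).length ≤ i + fuel →
      pvK (f :: tail) i fuel = (tail.foldl pvLcp2 f).length := by
  intro fuel
  induction fuel with
  | zero => intro i h1 h2; simp only [pvK]; omega
  | succ n ih =>
    intro i h1 h2
    rcases lt_or_eq_of_le h1 with hlt | heq
    · rw [pvK, if_pos ((pvColOK_iff f tail i h1).mpr hlt)]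
      exact ih (i + 1) (by omega) (by omega)
    · rw [pvK, if_neg (by
        intro hok
        have := (pvColOK_iff f tail i h1).mp hok
        omega)]
      exact heq

-- ---- trimming: the longest-first prefix search equals A's while loop ----

theorem pvEndsBA : pvEndsB.map String.toList = pvEndsA := by decide

theorem pvPick_congr (ports : List (List Char)) (a b : List Char) :
    ∀ is : List Nat, (∀ i ∈ is, a.take i = b.take i) →
      pvPick ports a is = pvPick ports b is := by
  intro is
  induction is with
  | nil => intro _; rfl
  | cons i is ih =>
    intro h
    simp only [pvPick, h i (by simp)]
    split
    · rfl
    · exact ih (fun j hj => h j (by simp [hj]))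

theorem pvRange'_reverse_succ (n : Nat) :
    (List.range' 1 (n + 1)).reverse = (n + 1) :: (List.range' 1 n).reverse := by
  rw [List.range'_concat]
  simp [Nat.add_comm]

theorem pvPick_eq (ports : List (List Char)) (pg : List Char) :
    pvPick ports pg ((List.range' 1 pg.length).reverse) = pvTrimA ports pg := by
  fun_induction pvTrimA ports pg with
  | case1 pg hcond =>
    cases pg with
    | nil => simp [pvPick]
    | cons c cs =>
      have htake : (c :: cs).take (cs.length + 1) = c :: cs :=
        List.take_of_length_le (by simp)
      simp only [List.length_cons, pvRange'_reverse_succ, pvPick, pvEndsBA, htake]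
      simp only [Bool.or_eq_true, beq_iff_eq, List.length_cons] at hcond
      have : (pvEndsA.any fun x => PySem.Chars.endswith (c :: cs) x) = true ∨
          ports.contains (c :: cs) = true := by
        rcases hcond with (h | h) | h
        · exact Or.inl h
        · omega
        · exact Or.inr h
      rw [if_pos (by
        rcases this with h | h
        · simp [h]
        · simp only [Bool.or_eq_true]
          exact Or.inr h)]
  | case2 pg hcond ih =>
    simp only [Bool.or_eq_true, beq_iff_eq, not_or] at hcond
    obtain ⟨⟨hany, hlen⟩, hmem⟩ := hcond
    cases pg with
    | nil => simp at hlen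
    | cons c cs =>
      have htake : (c :: cs).take (cs.length + 1) = c :: cs :=
        List.take_of_length_le (by simp)
      simp only [List.length_cons, pvRange'_reverse_succ, pvPick, pvEndsBA, htake]
      rw [if_neg (by
        simp only [Bool.or_eq_true, not_or]
        exact ⟨by simpa using hany, by simpa using hmem⟩)]
      rw [← ih]
      have hdl : (c :: cs).dropLast.length = cs.length := by simp
      rw [hdl]
      apply pvPick_congr
      intro i hi
      have hile : i ≤ cs.length := by
        have := List.mem_range'.mp (List.mem_reverse.mp hi)
        omega
      rw [List.dropLast_eq_take]
      rw [List.take_take]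
      congr 1
      simp only [List.length_cons, Nat.add_sub_cancel]
      omega

-- ===== VERDICT (by name: the statement is the Claim_ definition above) =====
theorem get_portgroup_name_from_ports_names_spec : Claim_equal_get_portgroup_name_from_ports_names := by
  intro ports_names _
  unfold Spec_get_portgroup_name_from_ports_names
  unfold get_portgroup_name_from_ports_names get_portgroup_name_from_ports_names_alt
  by_cases hlen : ports_names.length < 2
  · simp [hlen]
  · obtain ⟨p, ps, rfl⟩ : ∃ p ps, ports_names = p :: ps := by
      cases ports_names with
      | nil => simp at hlen
      | cons p ps => exact ⟨p, ps, rfl⟩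
    simp only [if_neg hlen, List.map_cons, List.headD_cons]
    have hA : p.toList.foldl (pvStepA (p.toList :: ps.map String.toList)) [] =
        (ps.map String.toList).foldl pvLcp2 p.toList :=
      pvFoldA p.toList (ps.map String.toList) p.toList [] rfl (by intro l _; exact List.nil_prefix)
    have hB : p.toList.take (pvK (p.toList :: ps.map String.toList) 0 p.toList.length) =
        (ps.map String.toList).foldl pvLcp2 p.toList := by
      have hle : ((ps.map String.toList).foldl pvLcp2 p.toList).length ≤ p.toList.length :=
        (pvFold_prefix (ps.map String.toList) p.toList).1.length_le
      rw [pvK_eq p.toList (ps.map String.toList) p.toList.length 0 (by omega) (by omega)]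
      exact ((List.prefix_iff_eq_take.mp (pvFold_prefix (ps.map String.toList) p.toList).1)).symm
    rw [hA, hB, pvPick_eq]
    rfl
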